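-- pv_equiv track=rewrite | github.com/Brunopezman/Algoritmos-y-Programacion-I | CLASE/practica_parcial.py | maximos_columnas
-- ===== SOURCE A (Python) =====
-- def maximos_columnas(matriz):
--     maximos = []
--
--     if not matriz:
--         return maximos
--
--     for c in range(len(matriz[0])):
--         maximo = matriz[0][c] #IMPORTANTE guardarse el primer elemento
--         for f in range(len(matriz)): #Iterando por columnas
--             if matriz[f][c] > maximo:
--                 maximo = matriz[f][c]
--         maximos.append(maximo)
--     return maximos
-- ===== SOURCE B (Python) =====
-- def maximos_columnas(matriz):
--     if not matriz:
--         return []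
--     maximos = list(matriz[0])
--     for fila in matriz[1:]:
--         for c in range(len(matriz[0])):
--             if fila[c] > maximos[c]:
--                 maximos[c] = fila[c]
--     return maximos
-- ===== Notes on version B (the rewrite author's own statement) =====
-- stated objective: alternative
-- what changed: Row-major single pass maintaining a running vector of column maxima (initialised to a copy of the first row and updated row by row) instead of finishing one whole column at a time with nested column-then-row loops.
import Mathlib
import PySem

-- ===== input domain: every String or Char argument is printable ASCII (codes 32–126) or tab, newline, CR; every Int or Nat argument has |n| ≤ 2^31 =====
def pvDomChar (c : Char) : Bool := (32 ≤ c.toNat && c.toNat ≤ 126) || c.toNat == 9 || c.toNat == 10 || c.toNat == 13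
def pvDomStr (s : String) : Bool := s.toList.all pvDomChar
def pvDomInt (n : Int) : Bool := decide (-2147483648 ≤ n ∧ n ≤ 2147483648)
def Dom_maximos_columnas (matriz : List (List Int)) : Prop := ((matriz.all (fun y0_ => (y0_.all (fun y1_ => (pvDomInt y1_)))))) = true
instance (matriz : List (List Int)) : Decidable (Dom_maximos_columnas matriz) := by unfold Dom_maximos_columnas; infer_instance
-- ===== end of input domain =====

-- B computes the column maxima in a single row-major pass over a running vector instead of
-- A's column-at-a-time nested loops; same asymptotic cost (objective: alternative).


-- ===== PORT A =====
-- Literal port of A: for each column c of the first row, scan every row index f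
-- keeping the running maximum, appending it to the output list.
-- In-range indexing is guaranteed by Pre_; `getD` stands for the Python indexings,
-- which never hit the default inside Pre_.
def maximos_columnas (matriz : List (List Int)) : List Int :=
  match matriz with
  | [] => []
  | row0 :: _ =>
    (List.range row0.length).foldl
      (fun maximos c =>
        maximos ++ [(List.range matriz.length).foldl
          (fun maximo f =>
            if (matriz.getD f []).getD c 0 > maximo then (matriz.getD f []).getD c 0 else maximo)
          (row0.getD c 0)])
      []

-- ===== PORT B =====
-- Literal port of B: maximos starts as a copy of the first row; each later row fila
-- updates maximos[c] in place (List.set) when fila[c] is larger.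
def maximos_columnas_alt (matriz : List (List Int)) : List Int :=
  match matriz with
  | [] => []
  | row0 :: rest =>
    rest.foldl
      (fun maximos fila =>
        (List.range row0.length).foldl
          (fun m c => if fila.getD c 0 > m.getD c 0 then m.set c (fila.getD c 0) else m)
          maximos)
      row0

-- ===== PRECONDITION & SPEC =====
-- Pre_ excludes exactly the jagged matrices on which the Python A raises IndexError:
-- some row shorter than the first row (both A and B raise there).
def Pre_maximos_columnas (matriz : List (List Int)) : Prop :=
  ∀ fila ∈ matriz, (matriz.headD []).length ≤ fila.length
instance (matriz : List (List Int)) : Decidable (Pre_maximos_columnas matriz) := by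
  unfold Pre_maximos_columnas; infer_instance

def pvWitness_maximos_columnas : List (List Int) := [[1, 2], [3, 0], [2, 5]]

def Spec_maximos_columnas (matriz : List (List Int)) (out : List Int) : Prop := out = maximos_columnas_alt matriz
instance (matriz : List (List Int)) (out : List Int) : Decidable (Spec_maximos_columnas matriz out) := by unfold Spec_maximos_columnas; infer_instance

-- ===== CLAIM (what is proved, stated in full; the proofs are below) =====
def Claim_equal_maximos_columnas : Prop := ∀ (matriz : List (List Int)), Dom_maximos_columnas matriz → Pre_maximos_columnas matriz → Spec_maximos_columnas matriz (maximos_columnas matriz)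

-- ===== LEMMAS AND PROOFS =====

def pvMax2 (a b : Int) : Int := if b > a then b else a

-- appending pure values in a foldl is a map
theorem pv_foldl_append_map {α β : Type} (g : α → β) :
    ∀ (l : List α) (acc : List β),
      l.foldl (fun acc c => acc ++ [g c]) acc = acc ++ l.map g := by
  intro l
  induction l with
  | nil => simp
  | cons x xs ih => intro acc; simp [List.foldl_cons, ih]

-- folding over indices of a list equals folding over the list
theorem pv_foldl_range_getD {α β : Type} (d : α) (g : β → α → β) :
    ∀ (xs : List α) (init : β),
      (List.range xs.length).foldl (fun a f => g a (xs.getD f d)) init = xs.foldl g init := by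
  intro xs
  induction xs with
  | nil => simp
  | cons x xs ih =>
    intro init
    simp only [List.length_cons, List.range_succ_eq_map, List.foldl_cons, List.foldl_map,
      List.getD_cons_zero, List.getD_cons_succ]
    exact ih (g init x)

def pvStep (fila : List Int) (m : List Int) (c : ℕ) : List Int :=
  if fila.getD c 0 > m.getD c 0 then m.set c (fila.getD c 0) else m

theorem pv_inner_len (fila : List Int) (k : ℕ) (m : List Int) :
    ((List.range k).foldl (pvStep fila) m).length = m.length := by
  induction k with
  | zero => simp
  | succ k ih =>
    simp only [List.range_succ, List.foldl_append, List.foldl_cons, List.foldl_nil, pvStep]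
    split <;> simp [ih]

theorem pv_getD_set (l : List Int) (i j : ℕ) (v : Int) :
    (l.set i v).getD j 0 = if i = j ∧ i < l.length then v else l.getD j 0 := by
  rw [List.getD_eq_getElem?_getD, List.getElem?_set]
  by_cases hij : i = j
  · subst hij
    by_cases hl : i < l.length
    · simp [hl]
    · simp [hl, List.getD_eq_getElem?_getD]
  · simp [hij, List.getD_eq_getElem?_getD]

theorem pv_inner_getD (fila : List Int) (k : ℕ) (m : List Int) : ∀ (c : ℕ),
    ((List.range k).foldl (pvStep fila) m).getD c 0 =
      if c < k ∧ c < m.length then pvMax2 (m.getD c 0) (fila.getD c 0) else m.getD c 0 := by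
  induction k with
  | zero => simp
  | succ k ih =>
    intro c
    simp only [List.range_succ, List.foldl_append, List.foldl_cons, List.foldl_nil]
    have hlen : ((List.range k).foldl (pvStep fila) m).length = m.length := pv_inner_len fila k m
    have hRk : ((List.range k).foldl (pvStep fila) m).getD k 0 = m.getD k 0 := by
      rw [ih k]; simp
    rw [show pvStep fila (List.foldl (pvStep fila) m (List.range k)) k =
      (if fila.getD k 0 > (List.foldl (pvStep fila) m (List.range k)).getD k 0
        then (List.foldl (pvStep fila) m (List.range k)).set k (fila.getD k 0)
        else List.foldl (pvStep fila) m (List.range k)) from rfl]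
    by_cases hcond : fila.getD k 0 > (List.foldl (pvStep fila) m (List.range k)).getD k 0
    · rw [if_pos hcond, pv_getD_set, ih c, hlen]
      rw [hRk] at hcond
      split_ifs with h0 h1 h2 h3 h4
      · obtain ⟨rfl, hl⟩ := h0
        simp only [pvMax2]
        rw [if_pos hcond]
      · omega
      · rfl
      · omega
      · omega
      · rfl
    · rw [if_neg hcond, ih c]
      rw [hRk] at hcond
      split_ifs with h1 h2 h3
      · rfl
      · omega
      · have hck : c = k := by omega
        subst hck
        simp only [pvMax2]
        rw [if_neg hcond]
      · rfl

-- B's outer loop, characterised pointwise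
theorem pv_outer (n : ℕ) :
    ∀ (rest : List (List Int)) (m : List Int), m.length = n →
      (rest.foldl (fun m fila => (List.range n).foldl (pvStep fila) m) m).length = n ∧
      ∀ c < n, (rest.foldl (fun m fila => (List.range n).foldl (pvStep fila) m) m).getD c 0 =
        rest.foldl (fun a fila => pvMax2 a (fila.getD c 0)) (m.getD c 0) := by
  intro rest
  induction rest with
  | nil => intro m hm; exact ⟨hm, fun c _ => rfl⟩
  | cons fila rest ih =>
    intro m hm
    simp only [List.foldl_cons]
    have hlen : ((List.range n).foldl (pvStep fila) m).length = n := by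
      rw [pv_inner_len]; exact hm
    obtain ⟨h1, h2⟩ := ih _ hlen
    refine ⟨h1, fun c hc => ?_⟩
    rw [h2 c hc, pv_inner_getD]
    simp [hc, hm]

theorem pvMax2_self (a : Int) : pvMax2 a a = a := by
  simp [pvMax2]

theorem maximos_columnas_eq (matriz : List (List Int)) :
    maximos_columnas matriz = maximos_columnas_alt matriz := by
  match matriz with
  | [] => rfl
  | row0 :: rest =>
    show (List.range row0.length).foldl _ [] = _
    rw [pv_foldl_append_map (fun c => (List.range (row0 :: rest).length).foldl
      (fun maximo f => if ((row0 :: rest).getD f []).getD c 0 > maximo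
        then ((row0 :: rest).getD f []).getD c 0 else maximo) (row0.getD c 0))]
    have hA : ∀ c, (List.range (row0 :: rest).length).foldl
        (fun maximo f => if ((row0 :: rest).getD f []).getD c 0 > maximo
          then ((row0 :: rest).getD f []).getD c 0 else maximo) (row0.getD c 0) =
        rest.foldl (fun a fila => pvMax2 a (fila.getD c 0)) (row0.getD c 0) := by
      intro c
      have h := pv_foldl_range_getD ([] : List Int) (fun a x => pvMax2 a (x.getD c 0)) (row0 :: rest) (row0.getD c 0)
      exact h.trans (by simp only [List.foldl_cons, pvMax2_self])
    obtain ⟨hlen, hget⟩ := pv_outer row0.length rest row0 rfl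
    show [] ++ (List.range row0.length).map _ =
      rest.foldl (fun maximos fila =>
        (List.range row0.length).foldl
          (fun m c => if fila.getD c 0 > m.getD c 0 then m.set c (fila.getD c 0) else m) maximos) row0
    have hstep : (fun (m : List Int) (fila : List Int) =>
        (List.range row0.length).foldl
          (fun m c => if fila.getD c 0 > m.getD c 0 then m.set c (fila.getD c 0) else m) m) =
        (fun m fila => (List.range row0.length).foldl (pvStep fila) m) := rfl
    rw [List.nil_append, hstep]
    apply List.ext_getElem
    · simpa using hlen.symm
    · intro i h1 h2
      have hi : i < row0.length := by simpa using h1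
      have := hget i hi
      rw [List.getD_eq_getElem?_getD, List.getElem?_eq_getElem h2, Option.getD_some] at this
      rw [List.getElem_map, List.getElem_range, this]
      exact hA i

-- ===== VERDICT (by name: the statement is the Claim_ definition above) =====
theorem maximos_columnas_spec : Claim_equal_maximos_columnas := by
  intro matriz _ _
  exact maximos_columnas_eq matriz
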